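-- pv_equiv track=rewrite | github.com/shinkeonkim/today-ps | BOJ/15000~15999/15243.py | f
-- ===== SOURCE A (Python) =====
-- def f(k,d):
--     if k %2==1:
--         return 0
--     if k == 2:
--         d[2] = 3
--         return 3
--     try:
--         return d[k] % 1000000007
--     except:
--         Mod = 1000000007
--         d[k] = f(k-2,d)*3
--         for i in range(0,k-2):
--             d[k] += f(i,d)*2
--             d[k] %= Mod
--         return d[k] % Mod
-- ===== SOURCE B (Python) =====
-- def f(k, d):
--     MOD = 1000000007
--     if k % 2 == 1:
--         return 0
--     if k == 2:
--         d[2] = 3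
--         return 3
--     if k in d:
--         return d[k] % MOD
--     # bottom-up over the even levels 4, 6, ..., k with a running prefix sum,
--     # consulting the memo at each level:  f(j) = 3*f(j-2) + 2*(f(0)+f(2)+...+f(j-4))
--     prev = 3            # f(2)
--     s = d[0] % MOD      # f(0) + f(2) + ... up to the level two below prev's
--     for j in range(4, k + 1, 2):
--         v = d[j] % MOD if j in d else (3 * prev + 2 * s) % MOD
--         s = (s + prev) % MOD
--         prev = v
--     return prev
-- ===== Notes on version B (the rewrite author's own statement) =====
-- stated objective: alternative
-- what changed: A's top-down memoized recursion re-sums all previous levels at every level; B computes the same recurrence in one bottom-up loop over the even levels with a running mod-reduced prefix sum. Pre_ excludes inputs where A raises RecursionError (no memoized base on the chain) and inputs where A only returns by recursing below level 0 into negative levels until it hits a memo key - an accidental wraparound on which B raises KeyError at d[0].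
-- outside the precondition, e.g. on f(6, {-2: 5}): A returns 153, B raises KeyError; on f(-4, {-8: 2}): A returns 18, B raises KeyError
import Mathlib
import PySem

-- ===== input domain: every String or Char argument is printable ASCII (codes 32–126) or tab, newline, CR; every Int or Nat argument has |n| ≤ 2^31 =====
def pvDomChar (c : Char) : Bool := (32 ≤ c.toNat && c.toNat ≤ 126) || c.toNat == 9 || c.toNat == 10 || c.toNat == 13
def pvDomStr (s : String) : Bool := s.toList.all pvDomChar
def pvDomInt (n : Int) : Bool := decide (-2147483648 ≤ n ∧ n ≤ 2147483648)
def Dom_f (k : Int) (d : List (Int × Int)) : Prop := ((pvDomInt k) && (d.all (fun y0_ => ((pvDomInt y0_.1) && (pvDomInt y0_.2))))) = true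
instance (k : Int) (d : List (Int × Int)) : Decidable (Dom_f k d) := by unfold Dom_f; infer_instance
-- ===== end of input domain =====

-- B replaces A's memoized recursion (which re-sums all previous levels at every step) by one
-- bottom-up pass with a running prefix sum; the equivalence proved here is about the RETURN
-- value only — A memoizes every computed level into d, B only writes d[2].

def pvMOD : Int := 1000000007

-- ===== PORT A =====
-- fuel-indexed literal port of A's recursion, threading the memo dict; the fuel only makes the
-- recursion total: `none` is exactly where the Python raises (KeyError-driven infinite descent).
def fALoopStep (rec : Int → PySem.Dict Int Int → Option (Int × PySem.Dict Int Int)) (k : Int)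
    (st : Option (PySem.Dict Int Int)) (i : Int) : Option (PySem.Dict Int Int) :=
  match st with
  | none => none
  | some dc =>
    match rec i dc with                                  -- f(i,d)
    | none => none
    | some rd' =>
      match rd'.2.get? k with
      | none => none
      | some a =>
        let d3 := rd'.2.insert k (a + rd'.1 * 2)         -- d[k] += f(i,d)*2
        match d3.get? k with
        | none => none
        | some b => some (d3.insert k (PySem.Int.mod b pvMOD))   -- d[k] %= Mod

def fAux : Nat → Int → PySem.Dict Int Int → Option (Int × PySem.Dict Int Int)
  | 0, _, _ => none
  | fuel+1, k, d =>
    if PySem.Int.mod k 2 = 1 then some (0, d)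
    else if k = 2 then some (3, d.insert 2 3)
    else
      match d.get? k with
      | some x => some (PySem.Int.mod x pvMOD, d)      -- try: return d[k] % 1000000007
      | none =>                                         -- except:
        match fAux fuel (k-2) d with                    -- d[k] = f(k-2,d)*3
        | none => none
        | some rd =>
          match (PySem.List.pyRange 0 (k-2) 1).foldl    -- for i in range(0,k-2):
              (fALoopStep (fun i dc => fAux fuel i dc) k) (some (rd.2.insert k (rd.1 * 3))) with
          | none => none
          | some dfin =>
            match dfin.get? k with
            | some x => some (PySem.Int.mod x pvMOD, dfin)       -- return d[k] % Mod
            | none => none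

def f (k : Int) (d : List (Int × Int)) : Int :=
  match fAux (k.natAbs + (d.map (fun p => p.1.natAbs)).sum + 3) k (PySem.Dict.mk d) with
  | some r => r.1
  | none => 0

-- ===== PORT B =====
-- one loop iteration of B: at even level j, take the memoized value if present,
-- else 3*prev + 2*s; then push prev into the running prefix sum s
def fAltStep (dd : PySem.Dict Int Int) (ps : Int × Int) (j : Int) : Int × Int :=
  let v := match dd.get? j with
    | some x => PySem.Int.mod x pvMOD
    | none => PySem.Int.mod (3 * ps.1 + 2 * ps.2) pvMOD
  (v, PySem.Int.mod (ps.2 + ps.1) pvMOD)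

def f_alt (k : Int) (d : List (Int × Int)) : Int :=
  let dd := PySem.Dict.mk d
  if PySem.Int.mod k 2 = 1 then 0
  else if k = 2 then 3
  else
    match dd.get? k with
    | some x => PySem.Int.mod x pvMOD
    | none =>
      -- s = d[0] % MOD; the KeyError when 0 ∉ d is outside Pre_f, so getD's default is never used there
      ((PySem.List.pyRange 4 (k+1) 2).foldl (fAltStep dd)
        (3, PySem.Int.mod (dd.getD 0 0) pvMOD)).1

-- ===== PRECONDITION & SPEC =====
-- Pre_f keeps odd k, k = 2, memoized k, and k ≥ 4 with the base level 0 memoized. It excludes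
-- the inputs where A raises RecursionError (even k whose chain k, k-2, … never meets a memo
-- entry) and also inputs where A only returns by recursing below level 0 into negative levels
-- until it happens to hit a memo key — an accidental wraparound of the recursion on which the
-- natural bottom-up B raises KeyError at d[0].
def Pre_f (k : Int) (d : List (Int × Int)) : Prop :=
  PySem.Int.mod k 2 = 1 ∨ k = 2 ∨ ((PySem.Dict.mk d).get? k).isSome = true ∨
    (4 ≤ k ∧ ((PySem.Dict.mk d).get? 0).isSome = true)
instance (k : Int) (d : List (Int × Int)) : Decidable (Pre_f k d) := by unfold Pre_f; infer_instance
def pvWitness_f : Int × (List (Int × Int)) := (4, [(0, 1)])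

def Spec_f (k : Int) (d : List (Int × Int)) (out : Int) : Prop := out = f_alt k d
instance (k : Int) (d : List (Int × Int)) (out : Int) : Decidable (Spec_f k d out) := by unfold Spec_f; infer_instance

-- ===== CLAIM (what is proved, stated in full; the proofs are below) =====
def Claim_equal_f : Prop := ∀ (k : Int) (d : List (Int × Int)), Dom_f k d → Pre_f k d → Spec_f k d (f k d)

-- ===== LEMMAS AND PROOFS =====

-- candidate memoized levels at or below t on t's even chain, and the nearest one
def pvCand (d0 : PySem.Dict Int Int) (t : Int) : List Int :=
  d0.keys.filter (fun x => decide (x ≤ t) && decide (PySem.Int.mod (t - x) 2 = 0))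

def pvJ? (d0 : PySem.Dict Int Int) (t : Int) : Option Int :=
  PySem.List.max? (pvCand d0 t) (fun x => x)

def pvUp : Nat → Int → Int
  | 0, v => v
  | s+1, v => PySem.Int.mod (3 * pvUp s v) pvMOD

-- the value A's recursion returns at a level t reached with an empty summation loop
def pvBase (d0 : PySem.Dict Int Int) (t : Int) : Int :=
  match pvJ? d0 t with
  | none => 0
  | some j => pvUp ((t - j).toNat / 2) (PySem.Int.mod (d0.getD j 0) pvMOD)

-- value/prefix-sum pair at even level 2*n (proof-side recurrence)
def bStep (dd : PySem.Dict Int Int) (ps : Int × Int) (n : Int) : Int × Int :=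
  let j := 2 * n
  let v := if j = 2 then 3
    else match dd.get? j with
      | some x => PySem.Int.mod x pvMOD
      | none => PySem.Int.mod (3 * ps.1 + 2 * ps.2) pvMOD
  (v, PySem.Int.mod (ps.2 + ps.1) pvMOD)

def pvIter (d0 : PySem.Dict Int Int) : Nat → Int × Int
  | 0 => (pvBase d0 0, 0)
  | n+1 => bStep d0 (pvIter d0 n) (n+1)

-- the pure value of A's recurrence at level j, relative to the ORIGINAL dict d0
def pvV (d0 : PySem.Dict Int Int) (j : Int) : Int :=
  if PySem.Int.mod j 2 = 1 then 0
  else if 0 ≤ j then (pvIter d0 (j.toNat / 2)).1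
  else pvBase d0 j

def pvGood (d0 : PySem.Dict Int Int) (j x : Int) : Prop :=
  d0.get? j = some x ∨ PySem.Int.mod x pvMOD = pvV d0 j

def pvCover (d0 dc : PySem.Dict Int Int) : Prop :=
  ∀ j : Int, (d0.get? j).isSome = true → (dc.get? j).isSome = true

def pvGoodLe (d0 dc : PySem.Dict Int Int) (k : Int) : Prop :=
  ∀ j x, dc.get? j = some x → j ≤ k → pvGood d0 j x

-- fuel that suffices for A's recursion at level k when j0 is a chain candidate
def pvNeed (j0 k : Int) : Nat := if 0 ≤ k then k.toNat + (-j0).toNat + 3 else (k - j0).toNat + 1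

-- the inputs (plus enough fuel) on which A's recursion at level k terminates
def pvOk (d0 : PySem.Dict Int Int) (fuel : Nat) (k : Int) : Prop :=
  1 ≤ fuel ∧ (PySem.Int.mod k 2 = 1 ∨ k = 2 ∨ (d0.get? k).isSome = true ∨
    (∃ j0, j0 ∈ pvCand d0 (if 0 < k then 0 else k) ∧ (4 ≤ k ∨ k ≤ 0) ∧ pvNeed j0 k ≤ fuel))

lemma pmodM (a : Int) : PySem.Int.mod a pvMOD = a % pvMOD :=
  PySem.Int.mod_eq_emod_of_pos (by norm_num [pvMOD])

lemma pmod2 (a : Int) : PySem.Int.mod a 2 = a % 2 :=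
  PySem.Int.mod_eq_emod_of_pos (by norm_num)

lemma two_mod_absorb (x y : Int) : (x + 2*(y % pvMOD)) % pvMOD = (x + 2*y) % pvMOD := by
  rw [Int.add_emod, Int.mul_emod, Int.emod_emod_of_dvd _ dvd_rfl, ← Int.mul_emod, ← Int.add_emod]

lemma mod_three : PySem.Int.mod 3 pvMOD = 3 := by rw [pmodM]; norm_num [pvMOD]

lemma mem_pvCand (d0 : PySem.Dict Int Int) (t j : Int) :
    j ∈ pvCand d0 t ↔ j ∈ d0.keys ∧ j ≤ t ∧ j % 2 = t % 2 := by
  simp only [pvCand, List.mem_filter, Bool.and_eq_true, decide_eq_true_eq, pmod2]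
  constructor
  · rintro ⟨h1, h2, h3⟩; exact ⟨h1, h2, by omega⟩
  · rintro ⟨h1, h2, h3⟩; exact ⟨h1, h2, by omega⟩

lemma mem_keys_of_get? (d0 : PySem.Dict Int Int) (t x : Int) (h : d0.get? t = some x) :
    t ∈ d0.keys := by
  by_contra hmem
  rw [(PySem.Dict.get?_eq_none_iff_not_mem_keys d0 t).mpr hmem] at h
  simp at h

lemma not_mem_keys_of_get?_none (d0 : PySem.Dict Int Int) (t : Int) (h : d0.get? t = none) :
    t ∉ d0.keys := (PySem.Dict.get?_eq_none_iff_not_mem_keys d0 t).mp h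

lemma pvJ?_of_mem (d0 : PySem.Dict Int Int) (t j : Int) (hj : j ∈ pvCand d0 t) :
    ∃ m, pvJ? d0 t = some m ∧ m ∈ pvCand d0 t := by
  rcases hm : pvJ? d0 t with _ | m
  · rw [pvJ?, PySem.List.max?_eq_none_iff] at hm
    rw [hm] at hj
    exact absurd hj (List.not_mem_nil)
  · exact ⟨m, rfl, PySem.List.max?_mem hm⟩

lemma pvBase_mem (d0 : PySem.Dict Int Int) (t x : Int) (h : d0.get? t = some x) :
    pvBase d0 t = PySem.Int.mod x pvMOD := by
  have hc : t ∈ pvCand d0 t := by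
    rw [mem_pvCand]
    exact ⟨mem_keys_of_get? d0 t x h, le_refl t, rfl⟩
  obtain ⟨m, hm, hmc⟩ := pvJ?_of_mem d0 t t hc
  have hmax := PySem.List.max?_isMax hm t hc
  have hmle : m ≤ t := ((mem_pvCand d0 t m).mp hmc).2.1
  have hmt : m = t := le_antisymm hmle hmax
  subst hmt
  rw [pvBase, hm]
  simp [PySem.Dict.getD_of_get?_eq_some _ _ h, pvUp]

lemma pvCand_shift (d0 : PySem.Dict Int Int) (t : Int) (h : d0.get? t = none) :
    pvCand d0 t = pvCand d0 (t-2) := by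
  have hmem := not_mem_keys_of_get?_none d0 t h
  unfold pvCand
  apply List.filter_congr
  intro x hx
  have hxt : x ≠ t := fun he => hmem (he ▸ hx)
  apply Bool.eq_iff_iff.mpr
  simp only [Bool.and_eq_true, decide_eq_true_eq, pmod2]
  constructor
  · rintro ⟨h1, h2⟩; exact ⟨by omega, by omega⟩
  · rintro ⟨h1, h2⟩; exact ⟨by omega, by omega⟩

lemma pvBase_rec (d0 : PySem.Dict Int Int) (t j0 : Int) (h : d0.get? t = none)
    (hj : j0 ∈ pvCand d0 t) :
    pvBase d0 t = PySem.Int.mod (3 * pvBase d0 (t-2)) pvMOD := by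
  obtain ⟨m, hm, hmc⟩ := pvJ?_of_mem d0 t j0 hj
  have hm2 : pvJ? d0 (t-2) = some m := by
    rw [pvJ?, ← pvCand_shift d0 t h]; exact hm
  have hmc' : m ∈ d0.keys ∧ m ≤ t ∧ m % 2 = t % 2 := (mem_pvCand d0 t m).mp hmc
  have hmt : m ≠ t := fun he => (not_mem_keys_of_get?_none d0 t h) (he ▸ hmc'.1)
  have hsteps : (t - m).toNat / 2 = ((t - 2 - m).toNat / 2) + 1 := by omega
  simp only [pvBase, hm, hm2, hsteps]
  rfl

lemma pvV_zero_of_odd (d0 : PySem.Dict Int Int) (j : Int) (h : PySem.Int.mod j 2 = 1) :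
    pvV d0 j = 0 := by rw [pvV, if_pos h]

lemma pvIter_fst (d0 : PySem.Dict Int Int) (n : Nat) : (pvIter d0 n).1 = pvV d0 (2*(n:Int)) := by
  have h2 : ((2*(n:Int)).toNat)/2 = n := by omega
  have h1 : PySem.Int.mod (2*(n:Int)) 2 = 0 := by rw [pmod2]; omega
  rw [pvV, if_neg (by rw [h1]; norm_num), if_pos (by omega), h2]

lemma pvV_two (d0 : PySem.Dict Int Int) : pvV d0 2 = 3 := by
  have : (2:Int) = 2*((1:Nat):Int) := by norm_num
  rw [this, ← pvIter_fst]
  simp [pvIter, bStep]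

lemma bStep_fst (d0 : PySem.Dict Int Int) (ps : Int × Int) (n : Int) :
    (bStep d0 ps n).1 = if 2*n = 2 then 3
      else match d0.get? (2*n) with
        | some x => PySem.Int.mod x pvMOD
        | none => PySem.Int.mod (3 * ps.1 + 2 * ps.2) pvMOD := rfl

lemma pvV_mem (d0 : PySem.Dict Int Int) (j x : Int) (he : j % 2 = 0) (h0 : 0 ≤ j) (h2 : j ≠ 2)
    (hm : d0.get? j = some x) : pvV d0 j = PySem.Int.mod x pvMOD := by
  have hmod : PySem.Int.mod j 2 = 0 := by rw [pmod2]; exact he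
  rcases Nat.eq_zero_or_pos j.toNat with hz | hp
  · have hj0 : j = 0 := by omega
    subst hj0
    rw [pvV, if_neg (by rw [hmod]; norm_num), if_pos le_rfl]
    show (pvIter d0 0).1 = _
    rw [pvIter]
    exact pvBase_mem d0 0 x hm
  · obtain ⟨m, hmeq⟩ : ∃ m, j.toNat / 2 = m + 1 := ⟨j.toNat/2 - 1, by omega⟩
    have hj : 2 * ((m + 1 : Nat) : Int) = j := by omega
    rw [pvV, if_neg (by rw [hmod]; norm_num), if_pos h0, hmeq]
    show (bStep d0 (pvIter d0 m) ((m+1 : Nat) : Int)).1 = _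
    rw [bStep_fst, hj, if_neg h2, hm]

lemma pvV_rec (d0 : PySem.Dict Int Int) (k : Int) (he : k % 2 = 0) (h4 : 4 ≤ k)
    (hm : d0.get? k = none) :
    pvV d0 k = PySem.Int.mod (3 * (pvIter d0 (k.toNat/2 - 1)).1 + 2 * (pvIter d0 (k.toNat/2 - 1)).2) pvMOD := by
  have hmod : PySem.Int.mod k 2 = 0 := by rw [pmod2]; exact he
  obtain ⟨m, hmeq⟩ : ∃ m, k.toNat / 2 = m + 1 := ⟨k.toNat/2 - 1, by omega⟩
  have hj : 2 * ((m + 1 : Nat) : Int) = k := by omega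
  rw [pvV, if_neg (by rw [hmod]; norm_num), if_pos (by omega : (0:Int) ≤ k), hmeq]
  simp only [Nat.add_sub_cancel]
  show (bStep d0 (pvIter d0 m) ((m+1 : Nat) : Int)).1 = _
  rw [bStep_fst, hj, if_neg (by omega : k ≠ 2), hm]

lemma pvV_le_zero (d0 : PySem.Dict Int Int) (k : Int) (he : k % 2 = 0) (hk : k ≤ 0) :
    pvV d0 k = pvBase d0 k := by
  have hmod : PySem.Int.mod k 2 = 0 := by rw [pmod2]; exact he
  rcases eq_or_lt_of_le hk with hk0 | hk0
  · subst hk0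
    rw [pvV, if_neg (by rw [hmod]; norm_num), if_pos le_rfl]
    rfl
  · rw [pvV, if_neg (by rw [hmod]; norm_num), if_neg (by omega)]

lemma pvIter_snd (d0 : PySem.Dict Int Int) (n : Nat) :
    (pvIter d0 n).2 = (((List.range n).map (fun i => (pvIter d0 i).1)).sum) % pvMOD := by
  induction n with
  | zero => simp [pvIter]
  | succ m ih =>
    have : (pvIter d0 (m+1)).2 = PySem.Int.mod ((pvIter d0 m).2 + (pvIter d0 m).1) pvMOD := rfl
    rw [this, pmodM, ih, Int.emod_add_emod, List.range_succ]
    simp [List.map_append]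

lemma pvV_sum (d0 : PySem.Dict Int Int) :
    ∀ n : Nat, ((PySem.List.pyRange 0 (2*(n:Int)) 1).map (pvV d0)).sum
      = ((List.range n).map (fun i => (pvIter d0 i).1)).sum := by
  intro n
  induction n with
  | zero => simp [PySem.List.pyRange_one_eq_nil]
  | succ m ih =>
    have h1 : 2*((m+1:Nat):Int) = (2*(m:Int) + 1) + 1 := by push_cast; ring
    have hodd : pvV d0 (2*(m:Int)+1) = 0 :=
      pvV_zero_of_odd d0 _ (by rw [pmod2]; omega)
    rw [h1, PySem.List.pyRange_one_succ_right (by omega),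
        PySem.List.pyRange_one_succ_right (by omega)]
    simp only [List.map_append, List.sum_append, ih, List.range_succ]
    simp [hodd, ← pvIter_fst]

lemma foldl_astep (d0 : PySem.Dict Int Int) :
    ∀ (L : List Int) (a : Int), L ≠ [] →
      L.foldl (fun a i => PySem.Int.mod (a + pvV d0 i * 2) pvMOD) a
        = (a + 2 * (L.map (pvV d0)).sum) % pvMOD := by
  intro L
  induction L with
  | nil => intro a h; exact absurd rfl h
  | cons i L' ih =>
    intro a _
    rcases eq_or_ne L' [] with hL | hL
    · subst hL; simp [pmodM]; ring_nf
    · have : (i :: L').foldl (fun a i => PySem.Int.mod (a + pvV d0 i * 2) pvMOD) a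
          = L'.foldl (fun a i => PySem.Int.mod (a + pvV d0 i * 2) pvMOD)
              (PySem.Int.mod (a + pvV d0 i * 2) pvMOD) := rfl
      rw [this, ih _ hL, pmodM, Int.emod_add_emod]
      congr 1
      simp [List.map_cons]
      ring

lemma pvLoop (d0 : PySem.Dict Int Int) (fuel : Nat) (k : Int)
    (IH : ∀ (k' : Int) (dc : PySem.Dict Int Int),
      pvOk d0 fuel k' → pvCover d0 dc → pvGoodLe d0 dc k' →
      ∃ d', fAux fuel k' dc = some (pvV d0 k', d') ∧ pvCover d0 d' ∧ pvGoodLe d0 d' k' ∧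
        ∀ j, k' < j → d'.get? j = dc.get? j)
    (hoki : ∀ i : Int, 0 ≤ i → i ≤ k - 3 → pvOk d0 fuel i) (hk4 : 4 ≤ k) :
    ∀ (L : List Int) (dc : PySem.Dict Int Int) (acc : Int),
      (∀ i ∈ L, 0 ≤ i ∧ i ≤ k - 3) →
      pvCover d0 dc →
      (∀ j x, dc.get? j = some x → j ≤ k → j ≠ k → pvGood d0 j x) →
      dc.get? k = some acc →
      ∃ dfin, L.foldl (fALoopStep (fun i dc => fAux fuel i dc) k) (some dc) = some dfin ∧
        pvCover d0 dfin ∧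
        (∀ j x, dfin.get? j = some x → j ≤ k → j ≠ k → pvGood d0 j x) ∧
        dfin.get? k = some (L.foldl (fun a i => PySem.Int.mod (a + pvV d0 i * 2) pvMOD) acc) ∧
        (∀ j, k < j → dfin.get? j = dc.get? j) := by
  intro L
  induction L with
  | nil =>
    intro dc acc _ hcov hgx hk
    exact ⟨dc, rfl, hcov, hgx, hk, fun _ _ => rfl⟩
  | cons i L' ih =>
    intro dc acc hbd hcov hgx hk
    obtain ⟨hi0, hik⟩ := hbd i (List.mem_cons_self ..)
    have hgl : pvGoodLe d0 dc i := fun j x hj hle =>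
      hgx j x hj (by omega) (by omega)
    obtain ⟨d', hfa, hcov', hgl', hfr'⟩ := IH i dc (hoki i hi0 hik) hcov hgl
    have hdk : d'.get? k = some acc := by rw [hfr' k (by omega)]; exact hk
    have hstep : fALoopStep (fun i dc => fAux fuel i dc) k (some dc) i
        = some ((d'.insert k (acc + pvV d0 i * 2)).insert k
            (PySem.Int.mod (acc + pvV d0 i * 2) pvMOD)) := by
      simp only [fALoopStep, hfa, hdk, PySem.Dict.get?_insert_self]
    set dnew := (d'.insert k (acc + pvV d0 i * 2)).insert k
        (PySem.Int.mod (acc + pvV d0 i * 2) pvMOD) with hdnew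
    have hget_dnew : ∀ j, j ≠ k → dnew.get? j = d'.get? j := by
      intro j hj
      rw [hdnew, PySem.Dict.get?_insert_of_ne _ _ hj, PySem.Dict.get?_insert_of_ne _ _ hj]
    have hcovn : pvCover d0 dnew := by
      intro j hj
      by_cases hjk : j = k
      · subst hjk; rw [hdnew, PySem.Dict.get?_insert_self]; rfl
      · rw [hget_dnew j hjk]; exact hcov' j hj
    have hgxn : ∀ j x, dnew.get? j = some x → j ≤ k → j ≠ k → pvGood d0 j x := by
      intro j x hj hle hne
      rw [hget_dnew j hne] at hj
      by_cases hji : j ≤ i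
      · exact hgl' j x hj hji
      · rw [hfr' j (by omega)] at hj
        exact hgx j x hj hle hne
    have hkn : dnew.get? k = some (PySem.Int.mod (acc + pvV d0 i * 2) pvMOD) := by
      rw [hdnew, PySem.Dict.get?_insert_self]
    obtain ⟨dfin, hfold, hcovf, hgxf, hkf, hfrf⟩ :=
      ih dnew (PySem.Int.mod (acc + pvV d0 i * 2) pvMOD)
        (fun j hj => hbd j (List.mem_cons_of_mem _ hj)) hcovn hgxn hkn
    refine ⟨dfin, ?_, hcovf, hgxf, ?_, ?_⟩
    · rw [List.foldl_cons, hstep]; exact hfold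
    · rw [List.foldl_cons]; exact hkf
    · intro j hj
      rw [hfrf j hj, hget_dnew j (by omega), hfr' j (by omega)]

lemma fAux_main (d0 : PySem.Dict Int Int) :
    ∀ (fuel : Nat) (k : Int) (dc : PySem.Dict Int Int),
      pvOk d0 fuel k → pvCover d0 dc → pvGoodLe d0 dc k →
      ∃ d', fAux fuel k dc = some (pvV d0 k, d') ∧ pvCover d0 d' ∧ pvGoodLe d0 d' k ∧
        ∀ j, k < j → d'.get? j = dc.get? j := by
  intro fuel
  induction fuel with
  | zero => intro k dc hok _ _; exact absurd hok.1 (by omega)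
  | succ fuel ih =>
    intro k dc hok hcov hgl
    by_cases hodd : PySem.Int.mod k 2 = 1
    · refine ⟨dc, ?_, hcov, hgl, fun _ _ => rfl⟩
      simp only [fAux, if_pos hodd, pvV_zero_of_odd d0 k hodd]
    by_cases hk2 : k = 2
    · subst hk2
      refine ⟨dc.insert 2 3, ?_, ?_, ?_, ?_⟩
      · simp [fAux, pvV_two]
      · intro j hj
        by_cases hj2 : j = 2
        · subst hj2; rw [PySem.Dict.get?_insert_self]; rfl
        · rw [PySem.Dict.get?_insert_of_ne _ _ hj2]; exact hcov j hj
      · intro j x hj hle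
        by_cases hj2 : j = 2
        · subst hj2
          rw [PySem.Dict.get?_insert_self] at hj
          exact Or.inr (by rw [← Option.some_inj.mp hj, mod_three, pvV_two])
        · rw [PySem.Dict.get?_insert_of_ne _ _ hj2] at hj
          exact hgl j x hj hle
      · intro j hj
        rw [PySem.Dict.get?_insert_of_ne _ _ (by omega)]
    have heven : k % 2 = 0 := by rw [pmod2] at hodd; omega
    rcases hmem : dc.get? k with _ | x
    · -- k not yet memoized: the except branch
      have hnotin : ¬ (d0.get? k).isSome = true := by
        intro h; have := hcov k h; rw [hmem] at this; simp at this
      have hd0k : d0.get? k = none := by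
        rcases h : d0.get? k with _ | v
        · rfl
        · exact absurd (by rw [h]; rfl) hnotin
      obtain ⟨-, hok2⟩ := hok
      have hchain : ∃ j0, j0 ∈ pvCand d0 (if 0 < k then 0 else k) ∧ (4 ≤ k ∨ k ≤ 0) ∧
          pvNeed j0 k ≤ fuel + 1 := by
        rcases hok2 with h | h | h | h
        · exact absurd h hodd
        · exact absurd h hk2
        · exact absurd h hnotin
        · exact h
      obtain ⟨j0, hj0, h4or0, hneed⟩ := hchain
      rcases h4or0 with hk4 | hk0
      · -- 4 ≤ k : the summation branch
        have hstart : (if (0:Int) < k then (0:Int) else k) = 0 := by split <;> omega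
        rw [hstart] at hj0
        obtain ⟨hj0k, hj0le, hj0par⟩ := (mem_pvCand d0 0 j0).mp hj0
        have hneed' : k.toNat + (-j0).toNat + 3 ≤ fuel + 1 := by
          unfold pvNeed at hneed; split at hneed <;> omega
        have hok2' : pvOk d0 fuel (k - 2) := by
          rcases (by omega : k = 4 ∨ 6 ≤ k) with h | h
          · exact ⟨by omega, Or.inr (Or.inl (by omega))⟩
          · refine ⟨by omega, Or.inr (Or.inr (Or.inr ⟨j0, ?_, Or.inl (by omega), ?_⟩))⟩
            · rw [show (if (0:Int) < k - 2 then (0:Int) else k - 2) = 0 by split <;> omega]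
              exact hj0
            · unfold pvNeed; split <;> omega
        have hoki : ∀ i : Int, 0 ≤ i → i ≤ k - 3 → pvOk d0 fuel i := by
          intro i h0i hik
          by_cases hip : PySem.Int.mod i 2 = 1
          · exact ⟨by omega, Or.inl hip⟩
          have hie : i % 2 = 0 := by rw [pmod2] at hip; omega
          rcases (by omega : i = 2 ∨ i = 0 ∨ 4 ≤ i) with h | h | h
          · exact ⟨by omega, Or.inr (Or.inl h)⟩
          · refine ⟨by omega, Or.inr (Or.inr (Or.inr ⟨j0, ?_, Or.inr (by omega), ?_⟩))⟩
            · rw [show (if (0:Int) < i then (0:Int) else i) = 0 by split <;> omega]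
              exact hj0
            · unfold pvNeed; split <;> omega
          · refine ⟨by omega, Or.inr (Or.inr (Or.inr ⟨j0, ?_, Or.inl h, ?_⟩))⟩
            · rw [show (if (0:Int) < i then (0:Int) else i) = 0 by split <;> omega]
              exact hj0
            · unfold pvNeed; split <;> omega
        obtain ⟨d1, hfa1, hcov1, hgl1, hfr1⟩ :=
          ih (k-2) dc hok2' hcov (fun j x hj hle => hgl j x hj (by omega))
        set r := pvV d0 (k-2) with hr
        set n := k.toNat / 2 - 1 with hn
        have hrn : r = (pvIter d0 n).1 := by
          rw [pvIter_fst, hr]; congr 1; omega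
        have hgx2 : ∀ j x, (d1.insert k (r * 3)).get? j = some x → j ≤ k → j ≠ k → pvGood d0 j x := by
          intro j x hj hle hne
          rw [PySem.Dict.get?_insert_of_ne _ _ hne] at hj
          by_cases hji : j ≤ k - 2
          · exact hgl1 j x hj hji
          · rw [hfr1 j (by omega)] at hj
            exact hgl j x hj hle
        obtain ⟨dfin, hfold, hcovf, hgxf, hkf, hfrf⟩ :=
          pvLoop d0 fuel k ih hoki hk4 (PySem.List.pyRange 0 (k-2) 1)
            (d1.insert k (r * 3)) (r * 3)
            (fun i hi => by rw [PySem.List.mem_pyRange_one] at hi; omega)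
            (fun j hj => by
              by_cases hjk : j = k
              · subst hjk; rw [PySem.Dict.get?_insert_self]; rfl
              · rw [PySem.Dict.get?_insert_of_ne _ _ hjk]; exact hcov1 j hj)
            hgx2 (PySem.Dict.get?_insert_self _ _ _)
        have hne : PySem.List.pyRange 0 (k-2) 1 ≠ [] := by
          rw [PySem.List.pyRange_one_cons (by omega)]; simp
        have hsum : ((PySem.List.pyRange 0 (k-2) 1).map (pvV d0)).sum
            = ((List.range n).map (fun i => (pvIter d0 i).1)).sum := by
          have h2n : (2*(n:Int)) = k - 2 := by omega
          rw [← h2n, pvV_sum]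
        have hstored : (PySem.List.pyRange 0 (k-2) 1).foldl
              (fun a i => PySem.Int.mod (a + pvV d0 i * 2) pvMOD) (r * 3)
            = (r * 3 + 2 * (((List.range n).map (fun i => (pvIter d0 i).1)).sum)) % pvMOD := by
          rw [foldl_astep d0 _ _ hne, hsum]
        have hpv : pvV d0 k = (r * 3 + 2 * (((List.range n).map (fun i => (pvIter d0 i).1)).sum)) % pvMOD := by
          rw [pvV_rec d0 k heven hk4 hd0k, ← hn, ← hrn, pvIter_snd, pmodM, two_mod_absorb]
          ring_nf
        refine ⟨dfin, ?_, hcovf, ?_, ?_⟩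
        · simp only [fAux, if_neg hodd, if_neg hk2, hmem, hfa1, hfold, hkf, hstored]
          rw [pmodM, Int.emod_emod_of_dvd _ dvd_rfl, ← hpv]
        · intro j x hj hle
          by_cases hjk : j = k
          · subst hjk
            rw [hkf, hstored] at hj
            refine Or.inr ?_
            rw [← Option.some_inj.mp hj, pmodM, Int.emod_emod_of_dvd _ dvd_rfl, ← hpv]
          · exact hgxf j x hj hle hjk
        · intro j hj
          rw [hfrf j hj, PySem.Dict.get?_insert_of_ne _ _ (by omega), hfr1 j (by omega)]
      · -- k ≤ 0 : the chain branch (empty summation loop)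
        have hstart : (if (0:Int) < k then (0:Int) else k) = k := by split <;> omega
        rw [hstart] at hj0
        obtain ⟨hj0k, hj0le, hj0par⟩ := (mem_pvCand d0 k j0).mp hj0
        have hj0ne : j0 ≠ k := fun he => (not_mem_keys_of_get?_none d0 k hd0k) (he ▸ hj0k)
        have hj0le2 : j0 ≤ k - 2 := by omega
        have hj0' : j0 ∈ pvCand d0 (k-2) := by
          rw [← pvCand_shift d0 k hd0k]; exact hj0
        have hfuelb : pvNeed j0 (k-2) ≤ fuel ∧ 1 ≤ fuel := by
          unfold pvNeed at hneed ⊢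
          split at hneed <;> split <;> omega
        have hok2' : pvOk d0 fuel (k - 2) := by
          refine ⟨hfuelb.2, Or.inr (Or.inr (Or.inr ⟨j0, ?_, Or.inr (by omega), hfuelb.1⟩))⟩
          rw [show (if (0:Int) < k - 2 then (0:Int) else k - 2) = k - 2 by split <;> omega]
          exact hj0'
        obtain ⟨d1, hfa1, hcov1, hgl1, hfr1⟩ :=
          ih (k-2) dc hok2' hcov (fun j x hj hle => hgl j x hj (by omega))
        set r := pvV d0 (k-2) with hr
        have hrb : r = pvBase d0 (k-2) := pvV_le_zero d0 (k-2) (by omega) (by omega)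
        have hnil : PySem.List.pyRange 0 (k-2) 1 = [] :=
          PySem.List.pyRange_one_eq_nil (by omega)
        have hval : PySem.Int.mod (r * 3) pvMOD = pvV d0 k := by
          rw [pvV_le_zero d0 k heven hk0, pvBase_rec d0 k j0 hd0k hj0, ← hrb]
          ring_nf
        refine ⟨d1.insert k (r * 3), ?_, ?_, ?_, ?_⟩
        · simp only [fAux, if_neg hodd, if_neg hk2, hmem, hfa1, hnil, List.foldl_nil,
            PySem.Dict.get?_insert_self, hval]
        · intro j hj
          by_cases hjk : j = k
          · subst hjk; rw [PySem.Dict.get?_insert_self]; rfl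
          · rw [PySem.Dict.get?_insert_of_ne _ _ hjk]; exact hcov1 j hj
        · intro j x hj hle
          by_cases hjk : j = k
          · subst hjk
            rw [PySem.Dict.get?_insert_self] at hj
            exact Or.inr (by rw [← Option.some_inj.mp hj, hval])
          · rw [PySem.Dict.get?_insert_of_ne _ _ hjk] at hj
            by_cases hji : j ≤ k - 2
            · exact hgl1 j x hj hji
            · rw [hfr1 j (by omega)] at hj
              exact hgl j x hj hle
        · intro j hj
          rw [PySem.Dict.get?_insert_of_ne _ _ (by omega), hfr1 j (by omega)]
    · -- memo hit
      have hgood := hgl k x hmem le_rfl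
      have hval : PySem.Int.mod x pvMOD = pvV d0 k := by
        rcases hgood with hm | hv
        · rcases (by omega : k < 0 ∨ 0 ≤ k) with hs | hs
          · rw [pvV_le_zero d0 k heven (by omega), pvBase_mem d0 k x hm]
          · rw [pvV_mem d0 k x heven hs hk2 hm]
        · exact hv
      refine ⟨dc, ?_, hcov, hgl, fun _ _ => rfl⟩
      simp only [fAux, if_neg hodd, if_neg hk2, hmem, hval]

-- B's loop step at level 4+2*n agrees with the proof-side bStep at index n+2
lemma fAltStep_eq_bStep (dd : PySem.Dict Int Int) (ps : Int × Int) (n : Nat) :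
    fAltStep dd ps (4 + 2*(n:Int)) = bStep dd ps ((n:Int) + 2) := by
  rw [fAltStep, bStep]
  rw [show 2 * ((n:Int) + 2) = 4 + 2*(n:Int) by ring, if_neg (by omega)]

-- B's fold over the levels 4, 6, … advances pvIter from index 1
lemma foldl_fAltStep (dd : PySem.Dict Int Int) :
    ∀ n : Nat, ((List.range n).map (fun i : Nat => 4 + 2*(i:Int))).foldl (fAltStep dd) (pvIter dd 1)
      = pvIter dd (n + 1) := by
  intro n
  induction n with
  | zero => simp
  | succ m ih =>
    rw [List.range_succ, List.map_append, List.foldl_append, ih]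
    simp only [List.map_cons, List.map_nil, List.foldl_cons, List.foldl_nil]
    rw [fAltStep_eq_bStep]
    show _ = bStep dd (pvIter dd (m+1)) ((m+1+1 : Nat) : Int)
    congr 1

lemma pvIter_one (dd : PySem.Dict Int Int) (x : Int) (h : dd.get? 0 = some x) :
    pvIter dd 1 = (3, PySem.Int.mod (PySem.Int.mod x pvMOD) pvMOD) := by
  show bStep dd (pvIter dd 0) 1 = _
  rw [pvIter, pvBase_mem dd 0 x h, bStep]
  norm_num

lemma mod_mod (x : Int) : PySem.Int.mod (PySem.Int.mod x pvMOD) pvMOD = PySem.Int.mod x pvMOD := by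
  rw [pmodM, pmodM, Int.emod_emod_of_dvd _ dvd_rfl]

lemma f_alt_eq_pvV (k : Int) (d : List (Int × Int)) (hpre : Pre_f k d) :
    f_alt k d = pvV (PySem.Dict.mk d) k := by
  set d0 := PySem.Dict.mk d with hd0
  rw [f_alt]
  by_cases hodd : PySem.Int.mod k 2 = 1
  · rw [if_pos hodd, pvV_zero_of_odd d0 k hodd]
  rw [if_neg hodd]
  have heven : k % 2 = 0 := by rw [pmod2] at hodd; omega
  by_cases hk2 : k = 2
  · subst hk2; rw [if_pos rfl, pvV_two]
  rw [if_neg hk2]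
  rcases hmem : d0.get? k with _ | x
  · -- not memoized: Pre_f gives 4 ≤ k and a memoized base at level 0
    have hk4 : 4 ≤ k ∧ (d0.get? 0).isSome = true := by
      rcases hpre with h | h | h | h
      · exact absurd h hodd
      · exact absurd h hk2
      · rw [← hd0, hmem] at h; simp at h
      · exact h
    obtain ⟨hk4, h0⟩ := hk4
    obtain ⟨x0, hx0⟩ := Option.isSome_iff_exists.mp h0
    set t := k.toNat / 2 with ht
    have hkt : k = 2*(t:Int) := by omega
    have hrange : PySem.List.pyRange 4 (k+1) 2
        = (List.range (t-1)).map (fun i : Nat => 4 + 2*(i:Int)) := by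
      rw [PySem.List.pyRange_of_pos 4 (k+1) (by norm_num), if_pos (by omega)]
      have harg : ((k + 1 - 4 + 2 - 1) / 2).toNat = t - 1 := by omega
      rw [harg]
    show ((PySem.List.pyRange 4 (k+1) 2).foldl (fAltStep d0)
        (3, PySem.Int.mod (d0.getD 0 0) pvMOD)).1 = pvV d0 k
    have hgd : d0.getD 0 0 = x0 := PySem.Dict.getD_of_get?_eq_some _ _ hx0
    have hinit : ((3 : Int), PySem.Int.mod (d0.getD 0 0) pvMOD) = pvIter d0 1 := by
      rw [pvIter_one d0 x0 hx0, hgd, mod_mod]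
    rw [hrange, hinit, foldl_fAltStep d0 (t-1), show t - 1 + 1 = t by omega, pvIter_fst, ← hkt]
  · show PySem.Int.mod x pvMOD = pvV d0 k
    rcases (by omega : k < 0 ∨ 0 ≤ k) with hs | hs
    · rw [pvV_le_zero d0 k heven (by omega), pvBase_mem d0 k x hmem]
    · rw [pvV_mem d0 k x heven hs hk2 hmem]

lemma f_eq_pvV (k : Int) (d : List (Int × Int)) (hpre : Pre_f k d) :
    f k d = pvV (PySem.Dict.mk d) k := by
  set d0 := PySem.Dict.mk d with hd0
  set fuel := k.natAbs + (d.map (fun p => p.1.natAbs)).sum + 3 with hfuel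
  have hok : pvOk d0 fuel k := by
    refine ⟨by omega, ?_⟩
    rcases hpre with h | h | h | ⟨hk4, h0⟩
    · exact Or.inl h
    · exact Or.inr (Or.inl h)
    · exact Or.inr (Or.inr (Or.inl h))
    · refine Or.inr (Or.inr (Or.inr ⟨0, ?_, Or.inl hk4, ?_⟩))
      · rw [show (if (0:Int) < k then (0:Int) else k) = 0 by split <;> omega, mem_pvCand]
        obtain ⟨x0, hx0⟩ := Option.isSome_iff_exists.mp h0
        exact ⟨mem_keys_of_get? d0 0 x0 hx0, le_refl 0, rfl⟩
      · unfold pvNeed; split <;> omega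
  obtain ⟨d', hfa, -, -, -⟩ :=
    fAux_main d0 fuel k d0 hok (fun _ h => h) (fun j x hj _ => Or.inl hj)
  rw [f, ← hd0, ← hfuel, hfa]

-- ===== VERDICT (by name: the statement is the Claim_ definition above) =====
theorem f_spec : Claim_equal_f := by
  intro k d _ hpre
  unfold Spec_f
  rw [f_eq_pvV k d hpre, f_alt_eq_pvV k d hpre]
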